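-- pv_equiv track=rewrite | github.com/AseemGodbole/TicketingPlatform | ticket-site-django/booking/views.py | calculate_seat_price
-- ===== SOURCE A (Python) =====
-- def calculate_seat_price(seats_list):
--     """Calculate total price for selected seats based on row"""
--     TOP_PRICE = 350    # rows A–F
--     BOTTOM_PRICE = 250  # rows G–P
--
--     total = 0
--     for seat_id in seats_list:
--         row = seat_id[0]
--         if row in "ABCDEFG":
--             total += TOP_PRICE
--         else:
--             total += BOTTOM_PRICE
--
--     return total
-- ===== SOURCE B (Python) =====
-- def calculate_seat_price(seats_list):
--     """Calculate total price for selected seats based on row"""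
--     n = len(seats_list)
--     if n == 0:
--         return 0
--     if n == 1:
--         return 350 if seats_list[0][0] in "ABCDEFG" else 250
--     mid = n // 2
--     return calculate_seat_price(seats_list[:mid]) + calculate_seat_price(seats_list[mid:])
-- ===== Notes on version B (the rewrite author's own statement) =====
-- stated objective: alternative
-- what changed: B computes the total by divide-and-conquer: it splits the seat list in half, recursively prices each half and adds the two subtotals, with singleton lists priced directly, instead of A's single pass accumulating a running total with a branch inside the loop.
import Mathlib
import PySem

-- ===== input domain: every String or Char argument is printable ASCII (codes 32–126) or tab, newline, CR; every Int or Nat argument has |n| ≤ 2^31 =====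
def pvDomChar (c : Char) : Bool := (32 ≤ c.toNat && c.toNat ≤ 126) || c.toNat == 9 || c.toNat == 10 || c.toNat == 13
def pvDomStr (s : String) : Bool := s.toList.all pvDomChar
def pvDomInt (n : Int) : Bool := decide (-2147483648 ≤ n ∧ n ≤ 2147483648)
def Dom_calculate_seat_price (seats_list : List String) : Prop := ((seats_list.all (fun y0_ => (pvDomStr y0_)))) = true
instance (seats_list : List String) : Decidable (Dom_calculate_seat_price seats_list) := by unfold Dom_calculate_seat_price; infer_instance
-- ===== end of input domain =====

-- B replaces A's single-pass branch-in-loop accumulation by a divide-and-conquer recursion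
-- (split in half, price each half, add), correct because the total price is additive over
-- concatenation of the seat list (objective: alternative).

-- ===== PORT A =====
-- row = seat_id[0] raises IndexError on ""; the '.getD' default is only reached outside Pre_.
def calculate_seat_price (seats_list : List String) : Int :=
  seats_list.foldl (fun total seat_id =>
    let row := (PySem.Str.pyGet? seat_id 0).getD ' '
    if ("ABCDEFG".toList).contains row then total + 350 else total + 250) 0

-- ===== PORT B =====
-- Transliteration of Source B: len, the two base cases, mid = n // 2 (n ≥ 0 so Nat division
-- agrees with Python's //), and the two slices seats_list[:mid], seats_list[mid:].
-- The fuel argument (initialised to the length) only makes the recursion structural;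
-- it never runs out, since each half is strictly shorter than the whole list.
def csp_go : Nat → List String → Int
  | 0, _ => 0
  | fuel+1, l =>
    let n := l.length
    if n = 0 then 0
    else if n = 1 then
      (if ("ABCDEFG".toList).contains
          ((PySem.Str.pyGet? ((PySem.List.pyGet? l 0).getD "") 0).getD ' ')
       then (350 : Int) else 250)
    else
      let mid := n / 2
      csp_go fuel (PySem.List.slice l (some 0) (some (mid : Int))) +
      csp_go fuel (PySem.List.slice l (some (mid : Int)) none)

def calculate_seat_price_alt (seats_list : List String) : Int :=
  csp_go seats_list.length seats_list

-- ===== PRECONDITION & SPEC =====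
-- Pre_ excludes inputs containing an empty seat string, on which A (and B) raise IndexError at seat_id[0].
def Pre_calculate_seat_price (seats_list : List String) : Prop :=
  ∀ s ∈ seats_list, s ≠ ""
instance (seats_list : List String) : Decidable (Pre_calculate_seat_price seats_list) := by unfold Pre_calculate_seat_price; infer_instance
def pvWitness_calculate_seat_price : List String := (["A1", "H7"])
def Spec_calculate_seat_price (seats_list : List String) (out : Int) : Prop := out = calculate_seat_price_alt seats_list
instance (seats_list : List String) (out : Int) : Decidable (Spec_calculate_seat_price seats_list out) := by unfold Spec_calculate_seat_price; infer_instance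

-- ===== CLAIM (what is proved, stated in full; the proofs are below) =====
def Claim_equal_calculate_seat_price : Prop := ∀ (seats_list : List String), Dom_calculate_seat_price seats_list → Pre_calculate_seat_price seats_list → Spec_calculate_seat_price seats_list (calculate_seat_price seats_list)

-- ===== LEMMAS AND PROOFS =====
theorem csp_foldl_acc (l : List String) (acc : Int) :
    l.foldl (fun total seat_id =>
      let row := (PySem.Str.pyGet? seat_id 0).getD ' '
      if ("ABCDEFG".toList).contains row then total + 350 else total + 250) acc
    = acc + calculate_seat_price l := by
  induction l generalizing acc with
  | nil => simp [calculate_seat_price]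
  | cons h t ih =>
    simp only [calculate_seat_price, List.foldl_cons]
    rw [ih, ih]
    by_cases hc : ("ABCDEFG".toList).contains ((PySem.Str.pyGet? h 0).getD ' ')
    · simp only [hc, if_pos]; ring
    · simp only [hc, Bool.false_eq_true, if_false]; ring

theorem csp_append (l₁ l₂ : List String) :
    calculate_seat_price (l₁ ++ l₂) = calculate_seat_price l₁ + calculate_seat_price l₂ := by
  unfold calculate_seat_price
  rw [List.foldl_append, csp_foldl_acc]
  rfl

theorem csp_go_eq (fuel : Nat) : ∀ (l : List String), l.length ≤ fuel →
    csp_go fuel l = calculate_seat_price l := by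
  induction fuel with
  | zero =>
    intro l hl
    rw [List.length_eq_zero_iff.mp (Nat.le_zero.mp hl)]
    simp [csp_go, calculate_seat_price]
  | succ fuel ih =>
    intro l hl
    rw [csp_go]
    by_cases h0 : l.length = 0
    · rw [if_pos h0]
      rw [List.length_eq_zero_iff.mp h0]
      simp [calculate_seat_price]
    · rw [if_neg h0]
      by_cases h1 : l.length = 1
      · rw [if_pos h1]
        obtain ⟨s, hs⟩ := List.length_eq_one_iff.mp h1
        subst hs
        simp [calculate_seat_price, PySem.List.pyGet?, PySem.List.pyIdx?]
      · rw [if_neg h1]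
        simp only [PySem.List.slice_zero_start, PySem.List.slice_to_natCast,
            PySem.List.slice_from_natCast]
        rw [ih (l.take (l.length / 2)) (by simp; omega),
            ih (l.drop (l.length / 2)) (by simp; omega)]
        rw [← csp_append, List.take_append_drop]

-- ===== VERDICT (by name: the statement is the Claim_ definition above) =====
theorem calculate_seat_price_spec : Claim_equal_calculate_seat_price := by
  intro seats_list _ _
  unfold Spec_calculate_seat_price
  unfold calculate_seat_price_alt
  rw [csp_go_eq seats_list.length seats_list le_rfl]
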